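-- pv_equiv track=rewrite | github.com/ling1726/swme_application | swme_domain/src/main/resources/migration_utils/V4/V__4_address_migration.py | getCity
-- ===== SOURCE A (Python) =====
-- def getCity(tokens):
--     pos = 0
--     city = ''
--     foundCity = False
--     for token in tokens:
--         if foundCity: city += ' '+token
--         if token == 'City:': foundCity = True
--     return city
-- ===== SOURCE B (Python) =====
-- def getCity(tokens):
--     try:
--         i = tokens.index('City:')
--     except ValueError:
--         return ''
--     tail = tokens[i + 1:]
--     return ' ' + ' '.join(tail) if tail else ''
-- ===== Notes on version B (the rewrite author's own statement) =====
-- stated objective: simpler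
-- what changed: Replaced the flag-driven single pass that interleaves marker detection with accumulation by a two-phase find-then-join: locate the first 'City:' with list.index, slice off the tail, and return ' ' + ' '.join(tail) (or '' when the marker is absent or the tail empty).
import Mathlib
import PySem

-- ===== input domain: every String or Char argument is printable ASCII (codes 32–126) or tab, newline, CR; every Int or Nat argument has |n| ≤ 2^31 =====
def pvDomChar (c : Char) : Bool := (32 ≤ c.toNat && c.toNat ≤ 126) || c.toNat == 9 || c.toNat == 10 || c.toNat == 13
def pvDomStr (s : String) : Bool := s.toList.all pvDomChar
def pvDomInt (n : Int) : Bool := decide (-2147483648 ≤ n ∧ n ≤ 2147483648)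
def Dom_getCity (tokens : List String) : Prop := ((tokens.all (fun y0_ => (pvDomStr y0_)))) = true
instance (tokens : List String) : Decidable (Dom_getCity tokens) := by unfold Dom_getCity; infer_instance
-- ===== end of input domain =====

-- B replaces A's flag-driven single pass with a find-then-join decomposition (objective: simpler).

-- ===== PORT A =====
-- loop body: 'if foundCity: city += " "+token; if token == "City:": foundCity = True'
def getCityStep (st : String × Bool) (token : String) : String × Bool :=
  let city := if st.2 then st.1 ++ (" " ++ token) else st.1
  let found := if token == "City:" then true else st.2
  (city, found)

def getCity (tokens : List String) : String :=
  (tokens.foldl getCityStep ("", false)).1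

-- ===== PORT B =====
def getCity_alt (tokens : List String) : String :=
  match PySem.List.index? tokens "City:" with
  | none => ""
  | some i =>
    let tail := PySem.List.slice tokens (some ((i : Int) + 1)) none
    if tail.isEmpty then "" else " " ++ PySem.Str.join " " tail

-- ===== PRECONDITION & SPEC =====
def Spec_getCity (tokens : List String) (out : String) : Prop := out = getCity_alt tokens
instance (tokens : List String) (out : String) : Decidable (Spec_getCity tokens out) := by unfold Spec_getCity; infer_instance

-- ===== CLAIM (what is proved, stated in full; the proofs are below) =====
def Claim_equal_getCity : Prop := ∀ (tokens : List String), Dom_getCity tokens → Spec_getCity tokens (getCity tokens)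

-- ===== LEMMAS AND PROOFS =====

-- Before the marker is seen, the state stays ("", false).
theorem foldl_step_not_found (pre : List String) (h : "City:" ∉ pre) :
    pre.foldl getCityStep ("", false) = ("", false) := by
  induction pre with
  | nil => rfl
  | cons x xs ih =>
    simp only [List.mem_cons, not_or] at h
    simp only [List.foldl_cons, getCityStep]
    have hx : (x == "City:") = false := by
      simp only [beq_eq_false_iff_ne, ne_eq]; exact fun he => h.1 he.symm
    simp [hx]
    exact ih h.2

-- After the flag is set it stays set, and the city accumulates ' '+token per token.
theorem foldl_step_found (suf : List String) (acc : String) :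
    suf.foldl getCityStep (acc, true) =
      (suf.foldl (fun a t => a ++ (" " ++ t)) acc, true) := by
  induction suf generalizing acc with
  | nil => rfl
  | cons x xs ih =>
    simp only [List.foldl_cons, getCityStep]
    simp [ih]

theorem toList_foldl_space (suf : List String) (acc : String) :
    (suf.foldl (fun a t => a ++ (" " ++ t)) acc).toList =
      acc.toList ++ suf.flatMap (fun t => ' ' :: t.toList) := by
  induction suf generalizing acc with
  | nil => simp
  | cons x xs ih => simp [ih]

theorem space_join_toList (t : String) (rest : List String) :
    (((" " : String) ++ PySem.Str.join " " (t :: rest))).toList =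
      (t :: rest).flatMap (fun s => ' ' :: s.toList) := by
  induction rest generalizing t with
  | nil =>
    simp [PySem.Str.toList_join, PySem.Chars.join, List.intercalate]
  | cons y ys ih =>
    have h := ih y
    simp only [String.toList_append, PySem.Str.toList_join, List.map_cons,
      PySem.Chars.join_cons_cons, List.flatMap_cons] at h ⊢
    simp at h ⊢
    exact h

-- ===== VERDICT (by name: the statement is the Claim_ definition above) =====
theorem getCity_spec : Claim_equal_getCity := by
  intro tokens _
  unfold Spec_getCity getCity getCity_alt
  cases hidx : PySem.List.index? tokens "City:" with
  | none =>
    have hmem : "City:" ∉ tokens := (PySem.List.index?_eq_none_iff tokens _).mp hidx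
    simp [foldl_step_not_found tokens hmem]
  | some i =>
    obtain ⟨pre, suf, htok, hlen, hpre⟩ := (PySem.List.index?_eq_some_iff tokens _ i).mp hidx
    subst htok
    have hslice : PySem.List.slice (pre ++ "City:" :: suf) (some ((i : Int) + 1)) none = suf := by
      have : ((i : Int) + 1) = ((i + 1 : Nat) : Int) := by push_cast; ring
      rw [this, PySem.List.slice_from_natCast]
      subst hlen
      simp
    rw [List.foldl_append]
    rw [foldl_step_not_found pre hpre]
    simp only [List.foldl_cons, getCityStep]
    simp only [beq_self_eq_true, if_true]
    rw [foldl_step_found]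
    simp only [hslice]
    cases suf with
    | nil => simp
    | cons t rest =>
      have h2 := space_join_toList t rest
      have h1 := toList_foldl_space (t :: rest) ""
      simp only [List.isEmpty_cons, if_false, Bool.false_eq_true]
      apply String.toList_injective
      rw [h1, h2]
      simp
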